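-- pv_equiv track=rewrite | github.com/KristianIvanov24/Introduction_to_programming_FMI | sem.08/solutions/ex8_solution.py | equal_zeros_and_ones
-- ===== SOURCE A (Python) =====
-- def decimal_to_binary(decimal_num):
--     binary_num = ""
--     if decimal_num == 0:
--         return "0"
--     while decimal_num > 0:
--         remainder = decimal_num % 2
--         binary_num = str(remainder) + binary_num
--         decimal_num = decimal_num // 2
--     return binary_num
--
-- def equal_zeros_and_ones(n):
--     binary = decimal_to_binary(n)
--     count_ones, count_zeroes = 0, 0
--
--     for number in binary:
--         if number == '0':
--             count_zeroes += 1
--         else: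
--             count_ones += 1
--
--     return count_ones == count_zeroes
-- ===== SOURCE B (Python) =====
-- def equal_zeros_and_ones(n):
--     # One pass over the bits of n itself: no binary string is built.
--     if n == 0:
--         return False  # "0" has one zero, no ones
--     ones, zeros = 0, 0
--     while n > 0:
--         if n % 2 == 1:
--             ones += 1
--         else:
--             zeros += 1
--         n //= 2
--     return ones == zeros
-- ===== Notes on version B (the rewrite author's own statement) =====
-- stated objective: simpler
-- what changed: Drops the helper and the intermediate binary string: counts ones and zeros of the bits of n directly in one loop with n % 2 and n //= 2, comparing the counts at the end (n == 0 returns False since its representation '0' has one zero).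
import Mathlib
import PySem

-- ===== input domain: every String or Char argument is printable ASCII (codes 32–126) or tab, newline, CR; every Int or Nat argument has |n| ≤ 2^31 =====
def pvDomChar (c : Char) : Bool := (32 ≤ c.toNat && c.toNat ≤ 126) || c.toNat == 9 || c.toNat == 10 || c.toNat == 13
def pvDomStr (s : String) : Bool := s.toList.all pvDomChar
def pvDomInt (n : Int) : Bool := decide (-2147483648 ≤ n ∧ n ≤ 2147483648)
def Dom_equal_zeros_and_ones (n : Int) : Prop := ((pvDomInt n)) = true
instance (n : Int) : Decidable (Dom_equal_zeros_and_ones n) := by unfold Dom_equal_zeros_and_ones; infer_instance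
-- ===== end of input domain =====

-- B drops the helper and the intermediate binary string, counting the bits of n
-- directly in one loop (objective: simpler).

-- ===== PORT A =====
-- while loop of decimal_to_binary; binary_num is carried as its list of characters
def pvDecToBinLoop (decimal_num : Int) (binary_num : List Char) : List Char :=
  if 0 < decimal_num then
    pvDecToBinLoop (PySem.Int.floordiv decimal_num 2)
      ((PySem.Int.toStr (PySem.Int.mod decimal_num 2)).toList ++ binary_num)
  else binary_num
termination_by decimal_num.toNat
decreasing_by
  rename_i h
  have h2 : PySem.Int.floordiv decimal_num 2 = decimal_num / 2 :=
    PySem.Int.floordiv_eq_ediv_of_pos (by omega)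
  rw [h2]; omega

def decimal_to_binary (decimal_num : Int) : List Char :=
  if decimal_num == 0 then ['0'] else pvDecToBinLoop decimal_num []

def equal_zeros_and_ones (n : Int) : Bool :=
  let binary := decimal_to_binary n
  let counts : Int × Int :=
    binary.foldl (fun cz number =>
      if number == '0' then (cz.1, cz.2 + 1) else (cz.1 + 1, cz.2)) (0, 0)
  counts.1 == counts.2

-- ===== PORT B =====
-- B's while loop: accumulates (ones, zeros) over the bits of n
def pvBitCountLoop (n ones zeros : Int) : Int × Int :=
  if 0 < n then
    if PySem.Int.mod n 2 == 1 then
      pvBitCountLoop (PySem.Int.floordiv n 2) (ones + 1) zeros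
    else
      pvBitCountLoop (PySem.Int.floordiv n 2) ones (zeros + 1)
  else (ones, zeros)
termination_by n.toNat
decreasing_by
  all_goals
    rename_i h _
    have h2 : PySem.Int.floordiv n 2 = n / 2 :=
      PySem.Int.floordiv_eq_ediv_of_pos (by omega)
    rw [h2]; omega

def equal_zeros_and_ones_alt (n : Int) : Bool :=
  if n == 0 then false
  else
    let oz := pvBitCountLoop n 0 0
    oz.1 == oz.2

-- ===== PRECONDITION & SPEC =====
def Spec_equal_zeros_and_ones (n : Int) (out : Bool) : Prop := out = equal_zeros_and_ones_alt n
instance (n : Int) (out : Bool) : Decidable (Spec_equal_zeros_and_ones n out) := by unfold Spec_equal_zeros_and_ones; infer_instance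

-- ===== CLAIM (what is proved, stated in full; the proofs are below) =====
def Claim_equal_equal_zeros_and_ones : Prop := ∀ (n : Int), Dom_equal_zeros_and_ones n → Spec_equal_zeros_and_ones n (equal_zeros_and_ones n)

-- ===== LEMMAS AND PROOFS =====

-- A's per-character counter, as the literal lambda of the port (so `show` can swap it in)
def pvCnt : Int × Int → Char → Int × Int := fun cz number =>
  if number == '0' then (cz.1, cz.2 + 1) else (cz.1 + 1, cz.2)

theorem pvDecToBinLoop_neg (m : Int) (acc : List Char) (h : ¬ 0 < m) :
    pvDecToBinLoop m acc = acc := by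
  conv_lhs => rw [pvDecToBinLoop]
  simp [h]

theorem pvDecToBinLoop_pos (m : Int) (acc : List Char) (h : 0 < m) :
    pvDecToBinLoop m acc =
      pvDecToBinLoop (m / 2) ((PySem.Int.toStr (PySem.Int.mod m 2)).toList ++ acc) := by
  conv_lhs => rw [pvDecToBinLoop]
  rw [if_pos h, PySem.Int.floordiv_eq_ediv_of_pos (by omega)]

theorem pvBitCountLoop_neg (m o z : Int) (h : ¬ 0 < m) :
    pvBitCountLoop m o z = (o, z) := by
  conv_lhs => rw [pvBitCountLoop]
  simp [h]

theorem pvBitCountLoop_pos (m o z : Int) (h : 0 < m) :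
    pvBitCountLoop m o z =
      if PySem.Int.mod m 2 == 1 then pvBitCountLoop (m / 2) (o + 1) z
      else pvBitCountLoop (m / 2) o (z + 1) := by
  conv_lhs => rw [pvBitCountLoop]
  rw [if_pos h, PySem.Int.floordiv_eq_ediv_of_pos (by omega)]

theorem pvMod_two_cases (m : Int) : PySem.Int.mod m 2 = 0 ∨ PySem.Int.mod m 2 = 1 := by
  have := PySem.Int.mod_eq_emod_of_pos (a := m) (b := 2) (by omega)
  omega

-- B's loop only shifts its accumulators
theorem pvBitCountLoop_shift (m ones zeros : Int) :
    pvBitCountLoop m ones zeros =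
      (ones + (pvBitCountLoop m 0 0).1, zeros + (pvBitCountLoop m 0 0).2) := by
  induction hk : m.toNat using Nat.strong_induction_on generalizing m ones zeros with
  | _ k ih =>
    by_cases h : 0 < m
    · have hlt : (m / 2).toNat < k := by omega
      have ihm := fun o z => ih (m / 2).toNat hlt (m / 2) o z rfl
      rw [pvBitCountLoop_pos m ones zeros h, pvBitCountLoop_pos m 0 0 h]
      split
      · rw [ihm (ones + 1) zeros, ihm (0 + 1) 0]
        simp [Prod.ext_iff]; omega
      · rw [ihm ones (zeros + 1), ihm 0 (0 + 1)]
        simp [Prod.ext_iff]; omega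
    · rw [pvBitCountLoop_neg m ones zeros h, pvBitCountLoop_neg m 0 0 h]
      simp

-- key lemma: folding A's counter over A's digit list equals running B's loop first
theorem pvFold_bin_eq_loop (m : Int) (acc : List Char) (ones zeros : Int) :
    (pvDecToBinLoop m acc).foldl pvCnt (ones, zeros) =
      acc.foldl pvCnt (pvBitCountLoop m ones zeros) := by
  induction hk : m.toNat using Nat.strong_induction_on generalizing m acc ones zeros with
  | _ k ih =>
    by_cases h : 0 < m
    · have hlt : (m / 2).toNat < k := by omega
      rw [pvDecToBinLoop_pos m acc h, pvBitCountLoop_pos m ones zeros h]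
      rcases pvMod_two_cases m with hm | hm <;> rw [hm]
      · have htl : (PySem.Int.toStr 0).toList = ['0'] := by decide
        have e1 : pvCnt (pvBitCountLoop (m / 2) ones zeros) '0' =
            pvBitCountLoop (m / 2) ones (zeros + 1) := by
          rw [pvBitCountLoop_shift (m / 2) ones zeros,
              pvBitCountLoop_shift (m / 2) ones (zeros + 1)]
          simp [pvCnt, Prod.ext_iff] <;> omega
        rw [htl, List.singleton_append,
            ih (m / 2).toNat hlt (m / 2) ('0' :: acc) ones zeros rfl,
            List.foldl_cons, if_neg (by decide : ¬ ((((0:Int)) == 1) = true)), e1]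
      · have htl : (PySem.Int.toStr 1).toList = ['1'] := by decide
        have e1 : pvCnt (pvBitCountLoop (m / 2) ones zeros) '1' =
            pvBitCountLoop (m / 2) (ones + 1) zeros := by
          rw [pvBitCountLoop_shift (m / 2) ones zeros,
              pvBitCountLoop_shift (m / 2) (ones + 1) zeros]
          simp [pvCnt, Prod.ext_iff] <;> omega
        rw [htl, List.singleton_append,
            ih (m / 2).toNat hlt (m / 2) ('1' :: acc) ones zeros rfl,
            List.foldl_cons, if_pos (by decide : ((((1:Int)) == 1) = true)), e1]
    · rw [pvDecToBinLoop_neg m acc h, pvBitCountLoop_neg m ones zeros h]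

-- ===== VERDICT (by name: the statement is the Claim_ definition above) =====
theorem equal_zeros_and_ones_spec : Claim_equal_equal_zeros_and_ones := by
  intro n _
  show equal_zeros_and_ones n = equal_zeros_and_ones_alt n
  by_cases hz : n = 0
  · subst hz; decide
  · have hz' : ¬ ((n == 0) = true) := by simp [hz]
    unfold equal_zeros_and_ones equal_zeros_and_ones_alt decimal_to_binary
    rw [if_neg hz', if_neg hz']
    show (((pvDecToBinLoop n []).foldl pvCnt (0, 0)).1 ==
          ((pvDecToBinLoop n []).foldl pvCnt (0, 0)).2) = _
    rw [pvFold_bin_eq_loop n [] 0 0]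
    rfl
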